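-- pv_equiv track=rewrite | github.com/tharittk/AoC-2024 | day14/day14.py | move_robot_n_step
-- ===== SOURCE A (Python) =====
-- def move_robot_n_step(robot, width, height, n):
--     x0 = robot[0]
--     y0 = robot[1]
--     vx = robot[2]
--     vy = robot[3]
--     for i in range(n):
--         x0 = (x0 + vx) % width
--         y0 = (y0 + vy) % height
--
--     return x0, y0
-- ===== SOURCE B (Python) =====
-- def move_robot_n_step(robot, width, height, n):
--     x0, y0, vx, vy = robot[0], robot[1], robot[2], robot[3]
--     if n <= 0:
--         return x0, y0
--     return (x0 + vx * n) % width, (y0 + vy * n) % height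
-- ===== Notes on version B (the rewrite author's own statement) =====
-- stated objective: faster
-- what changed: Replaces the n-iteration wrap-around loop with the closed form (x0+vx*n)%width, (y0+vy*n)%height (identity for n<=0, where the loop does not run).
import Mathlib
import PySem

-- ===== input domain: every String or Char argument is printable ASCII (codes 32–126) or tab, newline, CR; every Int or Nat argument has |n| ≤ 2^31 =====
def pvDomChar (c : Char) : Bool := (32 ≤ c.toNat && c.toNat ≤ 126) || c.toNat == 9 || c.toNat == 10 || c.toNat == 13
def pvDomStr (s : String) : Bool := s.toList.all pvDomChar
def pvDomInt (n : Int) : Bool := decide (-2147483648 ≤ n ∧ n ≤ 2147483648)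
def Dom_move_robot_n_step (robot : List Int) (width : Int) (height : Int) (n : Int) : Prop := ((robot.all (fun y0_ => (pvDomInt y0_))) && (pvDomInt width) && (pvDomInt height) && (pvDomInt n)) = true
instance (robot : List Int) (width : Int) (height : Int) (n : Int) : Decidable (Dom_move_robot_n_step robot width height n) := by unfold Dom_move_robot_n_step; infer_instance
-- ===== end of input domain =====

-- B replaces A's n-iteration wrapping loop by the closed form (x0+vx*n)%width, (y0+vy*n)%height (identity when n ≤ 0); objective: faster.

-- ===== PORT A =====
def move_robot_n_step (robot : List Int) (width : Int) (height : Int) (n : Int) : List Int :=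
  match PySem.List.pyGet? robot 0, PySem.List.pyGet? robot 1,
        PySem.List.pyGet? robot 2, PySem.List.pyGet? robot 3 with
  | some x0, some y0, some vx, some vy =>
      let p := (PySem.List.pyRange 0 n 1).foldl
        (fun (st : Int × Int) _ =>
          (PySem.Int.mod (st.1 + vx) width, PySem.Int.mod (st.2 + vy) height)) (x0, y0)
      [p.1, p.2]
  | _, _, _, _ => []   -- IndexError: excluded by Pre_

-- ===== PORT B =====
def move_robot_n_step_alt (robot : List Int) (width : Int) (height : Int) (n : Int) : List Int :=
  match robot with
  | x0 :: y0 :: vx :: vy :: _ =>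
      if n ≤ 0 then [x0, y0]
      else [PySem.Int.mod (x0 + vx * n) width, PySem.Int.mod (y0 + vy * n) height]
  | _ => []   -- IndexError: excluded by Pre_

-- ===== PRECONDITION & SPEC =====
-- Pre_ excludes exactly the inputs where Python A raises: a robot list with fewer than
-- four entries (IndexError) and, when the loop runs (n ≥ 1), a zero modulus (ZeroDivisionError).
def Pre_move_robot_n_step (robot : List Int) (width : Int) (height : Int) (n : Int) : Prop :=
  4 ≤ robot.length ∧ (n ≤ 0 ∨ (width ≠ 0 ∧ height ≠ 0))
instance (robot : List Int) (width : Int) (height : Int) (n : Int) : Decidable (Pre_move_robot_n_step robot width height n) := by unfold Pre_move_robot_n_step; infer_instance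

def pvWitness_move_robot_n_step : List Int × Int × Int × Int := ([2, 4, 2, -3], 11, 7, 100)

def Spec_move_robot_n_step (robot : List Int) (width : Int) (height : Int) (n : Int) (out : List Int) : Prop := out = move_robot_n_step_alt robot width height n
instance (robot : List Int) (width : Int) (height : Int) (n : Int) (out : List Int) : Decidable (Spec_move_robot_n_step robot width height n out) := by unfold Spec_move_robot_n_step; infer_instance

-- ===== CLAIM (what is proved, stated in full; the proofs are below) =====
def Claim_equal_move_robot_n_step : Prop := ∀ (robot : List Int) (width : Int) (height : Int) (n : Int), Dom_move_robot_n_step robot width height n → Pre_move_robot_n_step robot width height n → Spec_move_robot_n_step robot width height n (move_robot_n_step robot width height n)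

-- ===== LEMMAS AND PROOFS =====

theorem mod_step (a v w : Int) :
    PySem.Int.mod (PySem.Int.mod a w + v) w = PySem.Int.mod (a + v) w := by
  simp [PySem.Int.mod]

-- folding A's step function k times, k ≥ 1, gives the closed form
theorem loopA_closed (width height vx vy : Int) :
    ∀ (k : Nat) (x0 y0 : Int),
      (List.range (k + 1)).foldl
        (fun (st : Int × Int) _ =>
          (PySem.Int.mod (st.1 + vx) width, PySem.Int.mod (st.2 + vy) height)) (x0, y0)
      = (PySem.Int.mod (x0 + vx * (k + 1)) width, PySem.Int.mod (y0 + vy * (k + 1)) height) := by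
  intro k
  induction k with
  | zero => intro x0 y0; simp [List.range_succ]
  | succ m ih =>
      intro x0 y0
      rw [List.range_succ, List.foldl_append, ih]
      simp only [List.foldl_cons, List.foldl_nil]
      rw [mod_step, mod_step]
      refine Prod.ext ?_ ?_ <;> · show PySem.Int.mod _ _ = PySem.Int.mod _ _; congr 1; push_cast; ring

theorem move_robot_n_step_spec' (robot : List Int) (width height n : Int)
    (hpre : Pre_move_robot_n_step robot width height n) :
    move_robot_n_step robot width height n = move_robot_n_step_alt robot width height n := by
  obtain ⟨hlen, _⟩ := hpre
  match robot, hlen with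
  | x0 :: y0 :: vx :: vy :: rest, _ =>
    simp only [move_robot_n_step, move_robot_n_step_alt]
    rw [show PySem.List.pyGet? (x0 :: y0 :: vx :: vy :: rest) 0 = some x0 by simp [pysem],
        show PySem.List.pyGet? (x0 :: y0 :: vx :: vy :: rest) 1 = some y0 by simp [pysem],
        show PySem.List.pyGet? (x0 :: y0 :: vx :: vy :: rest) 2 = some vx by simp [pysem],
        show PySem.List.pyGet? (x0 :: y0 :: vx :: vy :: rest) 3 = some vy by simp [pysem]]
    by_cases hn : n ≤ 0
    · simp [hn, PySem.List.pyRange_one_eq_nil (by omega : n ≤ 0)]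
    · rw [not_le] at hn
      have hk : n = ((n.toNat - 1 : Nat) + 1 : Nat) := by omega
      simp only [if_neg (by omega : ¬ n ≤ 0)]
      rw [PySem.List.pyRange_one, hk]
      simp only [sub_zero]
      rw [show ((((n.toNat - 1 : Nat) + 1 : Nat) : Int)).toNat = (n.toNat - 1) + 1 by omega]
      rw [List.foldl_map, loopA_closed]
      push_cast
      ring_nf

-- ===== VERDICT (by name: the statement is the Claim_ definition above) =====
theorem move_robot_n_step_spec : Claim_equal_move_robot_n_step := by
  intro robot width height n _ hpre
  exact move_robot_n_step_spec' robot width height n hpre
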